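-- pv_equiv track=rewrite | github.com/S-TJones/Analysis-POTW--2020-2021- | POTW-7/Special Words.py | countSpecialWords
-- ===== SOURCE A (Python) =====
-- from collections import Counter
--
-- def countSpecialWords(k, s):
--     # Count the number of k-special 2-letter words that can be formed from s
--
--     memo = dict()
--     length = len(s)
--     count = 0
--     prev_count = 0
--     alphabet_value = {1: "A", 2: "B", 3: "C", 4: "D", 5: "E", 6: "F", 7: "G", 8: "H", 9: "I", 10: "J", 11: "K", 12: "L", 13: "M",
--                       14: "N", 15: "O", 16: "P", 17: "Q", 18: "R", 19: "S", 20: "T", 21: "U", 22: "V", 23: "W", 24: "X", 25: "Y", 26: "Z"}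
--     alphabet_letter = {"A": 1, "B": 2, "C": 3, "D": 4, "E": 5, "F": 6, "G": 7, "H": 8, "I": 9, "J": 10, "K": 11, "L": 12, "M": 13,
--                        "N": 14, "O": 15, "P": 16, "Q": 17, "R": 18, "S": 19, "T": 20, "U": 21, "V": 22, "W": 23, "X": 24, "Y": 25, "Z": 26}
--
--     for num in range(length):
--         prev_count = count
--         letter = s[num]
--
--         # Check for repeats
--         if letter in memo.keys():
--             count += memo[letter]
--             continue
--
--         letter_value = alphabet_letter[letter]
--         new_word = s[:num] + s[num+1:]
--         word_count = dict(Counter(new_word))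
--
--         upper_value = abs(letter_value + k)
--         lower_value = abs(letter_value - k)
--
--         # Check for Double
--         if (2 * letter_value) == k:
--             potential_letter = letter
--         else:
--             potential_letter = None
--
--         # Check for letter or character
--         if upper_value in alphabet_value.keys():
--             upper_letter = alphabet_value[upper_value]
--         else:
--             upper_letter = None
--
--         if lower_value in alphabet_value.keys():
--             lower_letter = alphabet_value[lower_value]
--         else:
--             lower_letter = None
--
--         # Letters exist, add count
--         if upper_letter and upper_letter in new_word:
--             count += word_count[upper_letter]
--         if lower_letter and lower_letter in new_word:
--             count += word_count[lower_letter]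
--         # if potential_letter and potential_letter in new_word:
--         #     count += word_count[potential_letter]
--
--         memo[letter] = count-prev_count
--
--     return count
-- ===== SOURCE B (Python) =====
-- from collections import Counter
--
-- def countSpecialWords(k, s):
--     # One pass over the distinct letters of s (global Counter), no slicing/memo:
--     # each occurrence of letter L (value v) pairs with every remaining occurrence
--     # of the letters whose value is abs(v+k) or abs(v-k).
--     alphabet_letter = {chr(64 + i): i for i in range(1, 27)}
--     alphabet_value = {i: chr(64 + i) for i in range(1, 27)}
--     counts = Counter(s)
--     total = 0
--     for letter, m in counts.items():
--         v = alphabet_letter[letter]  # KeyError on non-A..Z letters, as in the original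
--         for target in (abs(v + k), abs(v - k)):
--             t = alphabet_value.get(target)
--             if t is not None:
--                 total += m * (counts[t] - (t == letter))
--     return total
-- ===== Notes on version B (the rewrite author's own statement) =====
-- stated objective: faster
-- what changed: Replaces the positional loop with its per-position string slicing, per-letter Counter(new_word) rebuilds and memo dict by a single global Counter(s) plus one pass over the distinct letters, adding m*(count[target]-(target==letter)) for each of the two target values abs(v+k) and abs(v-k).
-- outside the precondition, e.g. on countSpecialWords(1, 'ab'): A raises KeyError, B raises KeyError
import Mathlib
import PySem

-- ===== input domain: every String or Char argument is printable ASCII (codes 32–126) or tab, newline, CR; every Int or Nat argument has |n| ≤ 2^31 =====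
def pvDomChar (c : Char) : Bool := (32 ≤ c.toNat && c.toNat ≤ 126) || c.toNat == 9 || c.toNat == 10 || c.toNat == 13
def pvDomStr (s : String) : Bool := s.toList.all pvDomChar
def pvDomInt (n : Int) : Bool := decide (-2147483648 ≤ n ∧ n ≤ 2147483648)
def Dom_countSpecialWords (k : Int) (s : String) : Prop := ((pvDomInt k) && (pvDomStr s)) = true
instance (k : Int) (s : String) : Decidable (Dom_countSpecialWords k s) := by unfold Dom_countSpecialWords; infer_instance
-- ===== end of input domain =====

-- B replaces A's per-position loop (slice + Counter rebuild at each first occurrence, memo dict)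
-- by one global Counter and a single pass over the distinct letters (objective: faster).

-- ===== PORT A =====
-- A's literal alphabet dicts
def pvAlphaValueA : PySem.Dict Int Char :=
  PySem.Dict.ofList [(1,'A'),(2,'B'),(3,'C'),(4,'D'),(5,'E'),(6,'F'),(7,'G'),(8,'H'),(9,'I'),
    (10,'J'),(11,'K'),(12,'L'),(13,'M'),(14,'N'),(15,'O'),(16,'P'),(17,'Q'),(18,'R'),(19,'S'),
    (20,'T'),(21,'U'),(22,'V'),(23,'W'),(24,'X'),(25,'Y'),(26,'Z')]
def pvAlphaLetterA : PySem.Dict Char Int :=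
  PySem.Dict.ofList [('A',1),('B',2),('C',3),('D',4),('E',5),('F',6),('G',7),('H',8),('I',9),
    ('J',10),('K',11),('L',12),('M',13),('N',14),('O',15),('P',16),('Q',17),('R',18),('S',19),
    ('T',20),('U',21),('V',22),('W',23),('X',24),('Y',25),('Z',26)]

-- "if <letter> and <letter> in new_word: count += word_count[<letter>]" (the two identical
-- if-statements of A's loop body; the key is present whenever the membership test passed,
-- so getD is exact)
def pvAddIfA (count : Int) (letter? : Option Char) (new_word : List Char)
    (word_count : PySem.Dict Char Int) : Int :=
  match letter? with
  | some c => if new_word.contains c then count + word_count.getD c 0 else count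
  | none => count

-- loop body of A's 'for num in range(length)' (the dead 'potential_letter' assignment of A is
-- never read and is omitted; 1-char Python strings are ported as Char, so the 1-char substring
-- test 'upper_letter in new_word' is char membership — exact)
def pvBodyA (k : Int) (l : List Char) (st : PySem.Dict Char Int × Int) (num : Int) :
    PySem.Dict Char Int × Int :=
  let memo := st.1
  let count := st.2
  let prev_count := count
  let letter := PySem.List.pyGetD l num ' '   -- s[num]; num ∈ range(len(s)), so exact
  match memo.get? letter with
  | some v => (memo, count + v)               -- 'if letter in memo.keys(): count += memo[letter]; continue'
  | none =>
    match pvAlphaLetterA.get? letter with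
    | none => (memo, count)                   -- Python raises KeyError here; excluded by Pre_
    | some letter_value =>
      let new_word := PySem.List.slice l none (some num) ++ PySem.List.slice l (some (num + 1)) none
      let word_count := PySem.Dict.counter new_word
      let upper_value := |letter_value + k|
      let lower_value := |letter_value - k|
      let upper_letter := pvAlphaValueA.get? upper_value
      let lower_letter := pvAlphaValueA.get? lower_value
      let count1 := pvAddIfA count upper_letter new_word word_count
      let count2 := pvAddIfA count1 lower_letter new_word word_count
      (memo.insert letter (count2 - prev_count), count2)

def countSpecialWords (k : Int) (s : String) : Int :=
  ((PySem.List.pyRange 0 (PySem.Str.len s) 1).foldl (pvBodyA k s.toList)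
    (PySem.Dict.empty, 0)).2

-- ===== PORT B =====
-- B's comprehension-built alphabet dicts
def pvAlphaLetterB : PySem.Dict Char Int :=
  PySem.Dict.ofList ((PySem.List.pyRange 1 27 1).map (fun i => (Char.ofNat (64 + i.toNat), i)))
def pvAlphaValueB : PySem.Dict Int Char :=
  PySem.Dict.ofList ((PySem.List.pyRange 1 27 1).map (fun i => (i, Char.ofNat (64 + i.toNat))))

-- body of B's 'for letter, m in counts.items()' loop (lm = (letter, m))
def pvItemB (k : Int) (counts : PySem.Dict Char Int) (total : Int) (lm : Char × Int) : Int :=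
  match pvAlphaLetterB.get? lm.1 with
  | none => total                             -- Python raises KeyError here; excluded by Pre_
  | some v =>
    [|v + k|, |v - k|].foldl (fun tot target =>
      match pvAlphaValueB.get? target with
      | some t => tot + lm.2 * (counts.getD t 0 - (if t == lm.1 then 1 else 0))
      | none => tot) total

def countSpecialWords_alt (k : Int) (s : String) : Int :=
  let counts := PySem.Dict.counter s.toList
  counts.items.foldl (pvItemB k counts) 0

-- ===== PRECONDITION & SPEC =====
def pvUpperAZ : List Char :=
  ['A','B','C','D','E','F','G','H','I','J','K','L','M',
   'N','O','P','Q','R','S','T','U','V','W','X','Y','Z']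

-- A raises KeyError on any character of s outside 'A'..'Z' (so does B); Pre_ excludes exactly those.
def Pre_countSpecialWords (k : Int) (s : String) : Prop :=
  (s.toList.all (fun c => pvUpperAZ.contains c)) = true
instance (k : Int) (s : String) : Decidable (Pre_countSpecialWords k s) := by
  unfold Pre_countSpecialWords; infer_instance

def pvWitness_countSpecialWords : Int × String := (1, "AB")

def Spec_countSpecialWords (k : Int) (s : String) (out : Int) : Prop := out = countSpecialWords_alt k s
instance (k : Int) (s : String) (out : Int) : Decidable (Spec_countSpecialWords k s out) := by
  unfold Spec_countSpecialWords; infer_instance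

-- ===== CLAIM (what is proved, stated in full; the proofs are below) =====
def Claim_equal_countSpecialWords : Prop := ∀ (k : Int) (s : String), Dom_countSpecialWords k s → Pre_countSpecialWords k s → Spec_countSpecialWords k s (countSpecialWords k s)

-- ===== LEMMAS AND PROOFS =====

-- value of a letter ('A' = 1 … 'Z' = 26) and the letter of a value
def pvVal (c : Char) : Int := (c.toNat : Int) - 64
def pvChr (u : Int) : Char := Char.ofNat (64 + u.toNat)

-- ideal contribution of one occurrence of letter c, for target value u, over the whole string l
def pvTerm (l : List Char) (c : Char) (u : Int) : Int :=
  if 1 ≤ u ∧ u ≤ 26 then ((l.count (pvChr u) : Int) - (if pvChr u = c then 1 else 0)) else 0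

def pvG (k : Int) (l : List Char) (c : Char) : Int :=
  pvTerm l c (|pvVal c + k|) + pvTerm l c (|pvVal c - k|)

lemma pvLetterA_get (c : Char) (h : c ∈ pvUpperAZ) :
    pvAlphaLetterA.get? c = some (pvVal c) := by
  fin_cases h <;> decide

lemma pvLetterB_eq : pvAlphaLetterB = pvAlphaLetterA := by decide

lemma pvValueB_eq : pvAlphaValueB = pvAlphaValueA := by decide

lemma pvValueA_get_in (u : Int) (h1 : 1 ≤ u) (h2 : u ≤ 26) :
    pvAlphaValueA.get? u = some (pvChr u) := by
  interval_cases u <;> decide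

set_option maxHeartbeats 2000000 in
lemma pvValueA_get_out (u : Int) (h : ¬ (1 ≤ u ∧ u ≤ 26)) :
    pvAlphaValueA.get? u = none := by
  have e : pvAlphaValueA = PySem.Dict.mk [(1,'A'),(2,'B'),(3,'C'),(4,'D'),(5,'E'),(6,'F'),(7,'G'),(8,'H'),(9,'I'),
    (10,'J'),(11,'K'),(12,'L'),(13,'M'),(14,'N'),(15,'O'),(16,'P'),(17,'Q'),(18,'R'),(19,'S'),
    (20,'T'),(21,'U'),(22,'V'),(23,'W'),(24,'X'),(25,'Y'),(26,'Z')] := PySem.Dict.ext (by decide)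
  rw [e]
  repeat rw [PySem.Dict.get?_mk_cons, if_neg (by simp only [beq_iff_eq]; omega)]
  rfl

-- counting in l with the single occurrence at index i removed
lemma pvCount_erase (l : List Char) (i : Nat) (hi : i < l.length) (x : Char) :
    (((l.take i ++ l.drop (i + 1)).count x : Int)) =
      (l.count x : Int) - (if x = l[i] then 1 else 0) := by
  have h1 : l.drop i = l[i] :: l.drop (i+1) := (List.getElem_cons_drop hi).symm
  have hsplit : l.count x = (l.take i).count x + (l.drop i).count x := by
    rw [← List.count_append, List.take_append_drop]
  rw [h1, List.count_cons] at hsplit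
  rw [List.count_append, hsplit]
  by_cases hx : x = l[i]
  · simp only [hx, beq_self_eq_true, if_pos]
    push_cast
    omega
  · simp only [hx, if_false, beq_iff_eq, Ne.symm hx]
    push_cast
    omega

-- one in-range/out-of-range branch of A equals the ideal pvTerm
lemma pvBranchA (l : List Char) (i : Nat) (hi : i < l.length) (u : Int) (count : Int) :
    pvAddIfA count (pvAlphaValueA.get? u) (l.take i ++ l.drop (i+1))
        (PySem.Dict.counter (l.take i ++ l.drop (i+1))) = count + pvTerm l l[i] u := by
  by_cases hu : 1 ≤ u ∧ u ≤ 26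
  · rw [pvValueA_get_in u hu.1 hu.2]
    unfold pvAddIfA pvTerm
    rw [if_pos hu]
    have hcz := pvCount_erase l i hi (pvChr u)
    by_cases hc : pvChr u ∈ (l.take i ++ l.drop (i+1))
    · simp only [List.contains_eq_mem, hc, decide_true, if_pos]
      rw [PySem.Dict.getD_counter, hcz]
    · simp only [List.contains_eq_mem, hc, decide_false, Bool.false_eq_true, if_false]
      have h0 : ((l.take i ++ l.drop (i+1)).count (pvChr u) : Int) = 0 := by
        simp [List.count_eq_zero_of_not_mem hc]
      omega
  · rw [pvValueA_get_out u hu]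
    unfold pvAddIfA pvTerm
    rw [if_neg hu]
    ring

-- A's loop invariant: after the first i iterations the memo maps every letter seen so far to
-- its ideal contribution pvG and the counter is the sum of pvG over the processed prefix
lemma pvLoopA_inv (k : Int) (l : List Char) (hpre : ∀ c ∈ l, c ∈ pvUpperAZ) (i : Nat)
    (hi : i ≤ l.length) :
    (∀ c, ((PySem.List.pyRange 0 (i : Int) 1).foldl (pvBodyA k l)
        (PySem.Dict.empty, 0)).1.get? c
        = if c ∈ l.take i then some (pvG k l c) else none) ∧
    ((PySem.List.pyRange 0 (i : Int) 1).foldl (pvBodyA k l)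
        (PySem.Dict.empty, 0)).2 = ((l.take i).map (pvG k l)).sum := by
  induction i with
  | zero => simp [PySem.List.pyRange]
  | succ i ih =>
    have hlt : i < l.length := by omega
    obtain ⟨h1, h2⟩ := ih (by omega)
    have hr : PySem.List.pyRange 0 ((i + 1 : Nat) : Int) 1
        = PySem.List.pyRange 0 (i : Int) 1 ++ [(i : Int)] := by
      rw [show ((i + 1 : Nat) : Int) = (i : Int) + 1 by push_cast; ring]
      exact PySem.List.pyRange_one_succ_right (by positivity)
    rw [hr, List.foldl_append, List.foldl_cons, List.foldl_nil]
    set st := (PySem.List.pyRange 0 (i : Int) 1).foldl (pvBodyA k l)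
        (PySem.Dict.empty, 0) with hst
    have hletter : PySem.List.pyGetD l (i : Int) ' ' = l[i] := by
      simp [PySem.List.pyGetD_natCast, List.getElem?_eq_getElem hlt]
    have htake : l.take (i + 1) = l.take i ++ [l[i]] := by
      rw [List.take_add_one, List.getElem?_eq_getElem hlt]
      rfl
    by_cases hmem : l[i] ∈ l.take i
    · -- repeat: memo hit
      have hget : st.1.get? l[i] = some (pvG k l l[i]) := by rw [h1]; simp [hmem]
      have hstep : pvBodyA k l st (i : Int) = (st.1, st.2 + pvG k l l[i]) := by
        simp only [pvBodyA, hletter, hget]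
      rw [hstep]
      constructor
      · intro c
        rw [h1 c]
        by_cases hc : c ∈ l.take i
        · have hc' : c ∈ l.take (i + 1) := htake ▸ List.mem_append_left _ hc
          simp [hc, hc']
        · have hcne : c ≠ l[i] := fun he => hc (he ▸ hmem)
          have hc' : c ∉ l.take (i + 1) := by
            rw [htake]
            intro hmem'
            rcases List.mem_append.mp hmem' with h | h
            · exact hc h
            · exact hcne (List.mem_singleton.mp h)
          simp [hc, hc']
      · rw [h2, htake, List.map_append, List.sum_append]
        simp
    · -- first occurrence
      have haz : l[i] ∈ pvUpperAZ := hpre _ (l.getElem_mem hlt)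
      have hget : st.1.get? l[i] = none := by rw [h1]; simp [hmem]
      have hslice : PySem.List.slice l none (some (i : Int)) ++
          PySem.List.slice l (some ((i : Int) + 1)) none = l.take i ++ l.drop (i + 1) := by
        rw [PySem.List.slice_to_natCast]
        rw [show ((i : Int) + 1) = (((i + 1 : Nat)) : Int) by push_cast; ring]
        rw [PySem.List.slice_from_natCast]
      have hstep : pvBodyA k l st (i : Int) =
          (st.1.insert l[i] (pvG k l l[i]), st.2 + pvG k l l[i]) := by
        simp only [pvBodyA, hletter, hget, pvLetterA_get _ haz, hslice]
        rw [pvBranchA l i hlt _ st.2, pvBranchA l i hlt _ _]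
        unfold pvG
        simp only [Prod.mk.injEq]
        refine ⟨?_, by ring⟩
        congr 1
        ring
      rw [hstep]
      constructor
      · intro c
        rw [PySem.Dict.get?_insert]
        by_cases hc : c = l[i]
        · have hc' : c ∈ l.take (i + 1) := by
            rw [htake, hc]
            exact List.mem_append_right _ (List.mem_singleton_self _)
          simp [hc, hc ▸ hc']
        · rw [if_neg hc, h1 c]
          by_cases hc2 : c ∈ l.take i
          · have hc' : c ∈ l.take (i + 1) := htake ▸ List.mem_append_left _ hc2
            simp [hc2, hc']
          · have hc' : c ∉ l.take (i + 1) := by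
              rw [htake]
              intro hmem'
              rcases List.mem_append.mp hmem' with h | h
              · exact hc2 h
              · exact hc (List.mem_singleton.mp h)
            simp [hc2, hc']
      · rw [h2, htake, List.map_append, List.sum_append]
        simp

lemma pvPre_mem (k : Int) (s : String) (hpre : Pre_countSpecialWords k s) :
    ∀ c ∈ s.toList, c ∈ pvUpperAZ := by
  intro c hc
  have := List.all_eq_true.mp hpre c hc
  simpa [List.contains_eq_mem] using this

lemma pvA_eq (k : Int) (s : String) (hpre : Pre_countSpecialWords k s) :
    countSpecialWords k s = ((s.toList.map (pvG k s.toList)).sum) := by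
  unfold countSpecialWords
  rw [PySem.Str.len_eq]
  have := (pvLoopA_inv k s.toList (pvPre_mem k s hpre) s.toList.length (le_refl _)).2
  rw [List.take_length] at this
  exact this

-- one iteration of B's loop adds m * pvG
lemma pvItemB_eq (k : Int) (l : List Char) (total : Int) (c : Char) (m : Int)
    (hc : c ∈ pvUpperAZ) :
    pvItemB k (PySem.Dict.counter l) total (c, m) = total + m * pvG k l c := by
  unfold pvItemB
  rw [pvLetterB_eq]
  simp only [pvLetterA_get c hc, List.foldl_cons, List.foldl_nil, pvValueB_eq]
  have hterm : ∀ (u : Int) (tot : Int),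
      (match pvAlphaValueA.get? u with
       | some t => tot + m * ((PySem.Dict.counter l).getD t 0 - (if t == c then 1 else 0))
       | none => tot) = tot + m * pvTerm l c u := by
    intro u tot
    by_cases hu : 1 ≤ u ∧ u ≤ 26
    · rw [pvValueA_get_in u hu.1 hu.2]
      simp only [PySem.Dict.getD_counter, beq_iff_eq]
      unfold pvTerm
      rw [if_pos hu]
    · rw [pvValueA_get_out u hu]
      unfold pvTerm
      rw [if_neg hu]
      ring
  rw [hterm, hterm]
  unfold pvG
  ring

-- B's whole loop over a list of distinct A–Z letters
lemma pvFoldB (k : Int) (l : List Char) (L : List Char) (hL : ∀ c ∈ L, c ∈ pvUpperAZ)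
    (init : Int) :
    ((L.map (fun c => (c, (List.count c l : Int)))).foldl
        (pvItemB k (PySem.Dict.counter l)) init)
      = init + (L.map (fun c => (List.count c l : Int) * pvG k l c)).sum := by
  induction L generalizing init with
  | nil => simp
  | cons c L ih =>
    simp only [List.map_cons, List.foldl_cons, List.sum_cons]
    rw [pvItemB_eq k l init c _ (hL c (List.mem_cons_self))]
    rw [ih (fun d hd => hL d (List.mem_cons_of_mem _ hd))]
    ring

lemma pvB_eq (k : Int) (s : String) (hpre : Pre_countSpecialWords k s) :
    countSpecialWords_alt k s =
      ((PySem.Set.ofList s.toList).map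
        (fun c => (s.toList.count c : Int) * pvG k s.toList c)).sum := by
  show ((PySem.Dict.counter s.toList).items.foldl
      (pvItemB k (PySem.Dict.counter s.toList)) 0)
    = ((PySem.Set.ofList s.toList).map
        (fun c => (s.toList.count c : Int) * pvG k s.toList c)).sum
  rw [PySem.Dict.items_counter]
  rw [pvFoldB k s.toList (PySem.Set.ofList s.toList)
    (fun c hc => pvPre_mem k s hpre c ((PySem.Set.mem_ofList _ _).mp hc)) 0]
  rw [zero_add]

lemma pvSum_group (l : List Char) (g : Char → Int) :
    (l.map g).sum = ((PySem.Set.ofList l).map (fun c => (l.count c : Int) * g c)).sum := by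
  rw [Finset.sum_list_map_count l g]
  have hfin : l.toFinset = (PySem.Set.ofList l).toFinset := by
    ext c
    simp [PySem.Set.mem_ofList]
  rw [show (∑ m ∈ l.toFinset, l.count m • g m)
      = ∑ m ∈ (PySem.Set.ofList l).toFinset, (l.count m : Int) * g m by
    rw [hfin]
    refine Finset.sum_congr rfl fun c _ => ?_
    simp]
  rw [List.sum_toFinset _ (PySem.Set.nodup_ofList l)]

-- ===== VERDICT (by name: the statement is the Claim_ definition above) =====
theorem countSpecialWords_spec : Claim_equal_countSpecialWords := by
  intro k s _ hpre
  unfold Spec_countSpecialWords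
  rw [pvA_eq k s hpre, pvB_eq k s hpre, pvSum_group]
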